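-- pv_equiv track=rewrite | github.com/cafrii/omega2 | 백준/Silver/2302. 극장 좌석/극장 좌석.py | solve
-- ===== SOURCE A (Python) =====
-- def solve(N:int, A:list[int])->int:
--     '''
--     Args:
--         N: number of seats (1~N)
--         A: seat number of VIPs
--     Returns:
--         number of allowed cases
--     '''
--
--     L = [1] # guarantee non-empty
--     # normal seats between two vips
--     # record only >=2 numbers
--
--     b = 1  # pre-a
--     for a in A:
--         L.append(a-b) if a-b>1 else None
--         b = a+1
--     L.append(N+1-b) if N+1-b>1 else None
--
--     max_l = max(L)
--     alloc_l = max(max_l, 3)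
--     dp = [0] * (alloc_l+1)
--
--     '''
--         allowed cases of 1 ~ L seat
--         [ 1 ] -> 1
--         [ 1, 2 ] -> 2
--         [ 1, 2, 3 ] -> 123, 213, 132 -> 3
--         [1,2,3,4] -> 1234 2134 1324 1243 2143 -> 5
--         일반화: [1,2,..k-2,k-1,k]
--
--         k위치 안바뀌는 경우 => dp[k-1]
--         k가 k-1과 바뀌는 경우 => dp[k-2]
--     '''
--     dp[1:2] = [1, 2]
--     for k in range(3, max_l+1): # 필요한 만큼만 계산
--         dp[k] = dp[k-1] + dp[k-2]
--
--     ans = 1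
--     for k in L: ans *= dp[k]
--
--     return ans
-- ===== SOURCE B (Python) =====
-- def fib_count(k: int) -> int:
--     # number of arrangements for one segment of k free seats (k >= 1)
--     if k == 1:
--         return 1
--     prev, curr = 1, 2
--     for _ in range(k - 2):
--         prev, curr = curr, prev + curr
--     return curr
--
-- def solve(N: int, A: list[int]) -> int:
--     ans = 1
--     b = 1
--     for a in A + [N + 1]:   # sentinel closes the last segment
--         g = a - b
--         if g > 1:
--             ans *= fib_count(g)
--         b = a + 1
--     return ans
-- ===== Notes on version B (the rewrite author's own statement) =====
-- stated objective: simpler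
-- what changed: B removes A's precomputed shared dp table (sized by the maximum gap, filled via slice-assignment and indexed per segment) and instead multiplies, in a single pass over seats plus a sentinel, a per-segment Fibonacci value computed on the fly by a rolling pair.
import Mathlib
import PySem

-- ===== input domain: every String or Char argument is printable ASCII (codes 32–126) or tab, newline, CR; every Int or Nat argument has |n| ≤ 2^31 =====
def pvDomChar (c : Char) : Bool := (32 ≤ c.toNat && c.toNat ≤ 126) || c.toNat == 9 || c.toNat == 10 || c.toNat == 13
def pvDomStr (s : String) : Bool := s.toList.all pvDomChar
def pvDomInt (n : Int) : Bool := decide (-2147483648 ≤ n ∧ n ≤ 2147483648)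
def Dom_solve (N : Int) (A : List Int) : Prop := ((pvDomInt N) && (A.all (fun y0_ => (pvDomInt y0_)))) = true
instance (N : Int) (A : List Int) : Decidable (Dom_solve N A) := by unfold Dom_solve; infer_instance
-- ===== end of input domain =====

-- B drops A's precomputed dp table: one pass over the gaps, multiplying a per-segment
-- Fibonacci value computed on the fly by a rolling pair (objective: simpler).

-- ===== PORT A =====
-- Literal port of A: build L (gap list), take max, allocate a dp table, dp[1:2] = [1,2],
-- fill dp[3..max_l], multiply dp[k] over L.  Python's list reads dp[k-1], dp[k-2], dp[k] are
-- ported as .getD _ 0 with .toNat: exact here because every such index is an integer in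
-- [1, max_l] and the table has length alloc_l + 2 > max_l (no IndexError, no negative index).
def solve (N : Int) (A : List Int) : Int :=
  let st := A.foldl (fun (st : List Int × Int) a =>
      (if a - st.2 > 1 then st.1 ++ [a - st.2] else st.1, a + 1)) ([1], 1)
  let L := if N + 1 - st.2 > 1 then st.1 ++ [N + 1 - st.2] else st.1
  let max_l := (PySem.List.max? L (fun x => x)).getD 0   -- L is nonempty, so max() cannot raise
  let alloc_l := max max_l 3
  let dp : List Int := List.replicate (alloc_l + 1).toNat 0
  -- dp[1:2] = [1, 2]
  let dp := PySem.List.slice dp none (some 1) ++ [1, 2] ++ PySem.List.slice dp (some 2) none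
  let dp := (PySem.List.pyRange 3 (max_l + 1)).foldl
      (fun dp k => dp.set k.toNat (dp.getD (k - 1).toNat 0 + dp.getD (k - 2).toNat 0)) dp
  L.foldl (fun ans k => ans * dp.getD k.toNat 0) 1

-- ===== PORT B =====
-- helper fib_count of Source B: rolling pair (prev, curr) iterated k - 2 times
def fibCount (k : Int) : Int :=
  if k = 1 then 1
  else ((List.range (k - 2).toNat).foldl (fun (pc : Int × Int) _ => (pc.2, pc.1 + pc.2)) (1, 2)).2

def solve_alt (N : Int) (A : List Int) : Int :=
  ((A ++ [N + 1]).foldl (fun (st : Int × Int) a =>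
      (if a - st.2 > 1 then st.1 * fibCount (a - st.2) else st.1, a + 1)) (1, 1)).1

-- ===== PRECONDITION & SPEC =====
def Spec_solve (N : Int) (A : List Int) (out : Int) : Prop := out = solve_alt N A
instance (N : Int) (A : List Int) (out : Int) : Decidable (Spec_solve N A out) := by unfold Spec_solve; infer_instance

-- ===== CLAIM (what is proved, stated in full; the proofs are below) =====
def Claim_equal_solve : Prop := ∀ (N : Int) (A : List Int), Dom_solve N A → Spec_solve N A (solve N A)

-- ===== LEMMAS AND PROOFS =====

-- the Fibonacci numbers with fibI 1 = 1, fibI 2 = 2 (the value dp's recurrence tabulates)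
def fibI : Nat → Int
  | 0 => 1
  | 1 => 1
  | n + 2 => fibI (n + 1) + fibI n

-- the sequence of gaps > 1 that both programs extract from the seat list
def gaps (b : Int) : List Int → List Int
  | [] => []
  | a :: r => if a - b > 1 then (a - b) :: gaps (a + 1) r else gaps (a + 1) r

-- the running lower bound b after a pass over the list
def endB (b : Int) : List Int → Int
  | [] => b
  | a :: r => endB (a + 1) r

lemma gaps_cons (b a : Int) (r : List Int) :
    gaps b (a :: r) = if a - b > 1 then (a - b) :: gaps (a + 1) r else gaps (a + 1) r := rfl

lemma foldA (xs : List Int) : ∀ (L0 : List Int) (b : Int),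
    xs.foldl (fun (st : List Int × Int) a =>
        (if a - st.2 > 1 then st.1 ++ [a - st.2] else st.1, a + 1)) (L0, b)
      = (L0 ++ gaps b xs, endB b xs) := by
  induction xs with
  | nil => intro L0 b; simp [gaps, endB]
  | cons a r ih =>
      intro L0 b
      simp only [List.foldl_cons, gaps_cons, endB]
      by_cases h : a - b > 1 <;> simp [h, ih]

lemma gaps_append (xs : List Int) : ∀ (ys : List Int) (b : Int),
    gaps b (xs ++ ys) = gaps b xs ++ gaps (endB b xs) ys := by
  induction xs with
  | nil => intro ys b; simp [gaps, endB]
  | cons a r ih =>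
      intro ys b
      simp only [List.cons_append, gaps_cons, endB]
      by_cases h : a - b > 1 <;> simp [h, ih]

lemma gaps_ge_two (xs : List Int) : ∀ (b g : Int), g ∈ gaps b xs → 2 ≤ g := by
  induction xs with
  | nil => intro b g h; simp [gaps] at h
  | cons a r ih =>
      intro b g h
      rw [gaps_cons] at h
      by_cases hc : a - b > 1
      · simp only [hc, if_true, List.mem_cons] at h
        rcases h with h | h
        · omega
        · exact ih _ _ h
      · simp only [hc, if_false] at h
        exact ih _ _ h

lemma foldB (xs : List Int) : ∀ (ans b : Int),
    xs.foldl (fun (st : Int × Int) a =>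
        (if a - st.2 > 1 then st.1 * fibCount (a - st.2) else st.1, a + 1)) (ans, b)
      = (ans * ((gaps b xs).map fibCount).prod, endB b xs) := by
  induction xs with
  | nil => intro ans b; simp [gaps, endB]
  | cons a r ih =>
      intro ans b
      simp only [List.foldl_cons, gaps_cons, endB]
      by_cases h : a - b > 1
      · simp [h, ih, mul_assoc]
      · simp [h, ih]

lemma foldl_mul (f : Int → Int) (l : List Int) : ∀ (i : Int),
    l.foldl (fun a k => a * f k) i = i * (l.map f).prod := by
  induction l with
  | nil => intro i; simp
  | cons a r ih => intro i; simp [ih, mul_assoc]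

lemma fib_pair (n : Nat) :
    (List.range n).foldl (fun (pc : Int × Int) _ => (pc.2, pc.1 + pc.2)) (1, 2)
      = (fibI (n + 1), fibI (n + 2)) := by
  induction n with
  | zero => simp [fibI]
  | succ m ih =>
      rw [List.range_succ, List.foldl_append, ih]
      simp only [List.foldl_cons, List.foldl_nil, Prod.mk.injEq]
      exact ⟨trivial, add_comm (fibI (m + 1)) (fibI (m + 2))⟩

lemma fibCount_eq (g : Int) (h : 1 ≤ g) : fibCount g = fibI g.toNat := by
  by_cases h1 : g = 1
  · simp [fibCount, h1]; rfl
  · have : (g - 2).toNat + 2 = g.toNat := by omega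
    rw [fibCount, if_neg h1, fib_pair, ← this]

-- the dp-filling loop preserves the table length
lemma length_foldl_set (l : List Int) : ∀ (dp : List Int),
    (l.foldl (fun dp k => dp.set k.toNat (dp.getD (k - 1).toNat 0 + dp.getD (k - 2).toNat 0)) dp).length
      = dp.length := by
  induction l with
  | nil => intro dp; rfl
  | cons a r ih =>
      intro dp
      rw [List.foldl_cons, ih]
      simp

lemma getD_set_ne (l : List Int) (i j : Nat) (v d : Int) (h : i ≠ j) :
    (l.set i v).getD j d = l.getD j d := by
  simp [List.getD, List.getElem?_set_ne h]

lemma getD_set_eq (l : List Int) (i : Nat) (v d : Int) (h : i < l.length) :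
    (l.set i v).getD i d = v := by
  simp [List.getD, h]

-- after filling 3..m, positions 1..m of the table hold fibI
lemma dp_loop (dp1 : List Int)
    (h1 : dp1.getD 1 0 = fibI 1) (h2 : dp1.getD 2 0 = fibI 2) :
    ∀ (m : Nat), 1 ≤ m → m < dp1.length →
      ∀ (j : Nat), 1 ≤ j → j ≤ m →
        ((PySem.List.pyRange 3 ((m : Int) + 1)).foldl
            (fun dp k => dp.set k.toNat (dp.getD (k - 1).toNat 0 + dp.getD (k - 2).toNat 0))
            dp1).getD j 0 = fibI j := by
  intro m
  induction m with
  | zero => omega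
  | succ m ih =>
      intro hm hlen j hj1 hj2
      by_cases hm2 : 2 ≤ m
      · have hcast : (((m + 1 : Nat) : Int) + 1) = (((m : Nat) : Int) + 1) + 1 := by push_cast; ring
        rw [hcast, PySem.List.pyRange_one_succ_right (by omega), List.foldl_append]
        simp only [List.foldl_cons, List.foldl_nil]
        have hlen' := length_foldl_set (PySem.List.pyRange 3 ((m : Int) + 1)) dp1
        have e1 : ((m : Int) + 1).toNat = m + 1 := by omega
        have e2 : ((m : Int) + 1 - 1).toNat = m := by omega
        have e3 : ((m : Int) + 1 - 2).toNat = m - 1 := by omega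
        rw [e1, e2, e3]
        by_cases hj : j = m + 1
        · subst hj
          rw [getD_set_eq _ _ _ _ (by omega)]
          rw [ih (by omega) (by omega) m (by omega) (by omega),
            ih (by omega) (by omega) (m - 1) (by omega) (by omega)]
          obtain ⟨n, rfl⟩ : ∃ n, m = n + 2 := ⟨m - 2, by omega⟩
          rfl
        · rw [getD_set_ne _ _ _ _ _ (by omega)]
          exact ih (by omega) (by omega) j hj1 (by omega)
      · have hnil : (((m + 1 : Nat) : Int) + 1) ≤ 3 := by omega
        rw [PySem.List.pyRange_one_eq_nil hnil]
        simp only [List.foldl_nil]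
        have : j = 1 ∨ j = 2 := by omega
        rcases this with h | h <;> subst h
        · exact h1
        · exact h2

-- the fully built dp table of A, read at 1 ≤ g ≤ M, holds fibI g
lemma dp_value (M : Int) (hM : 1 ≤ M) (g : Int) (hg1 : 1 ≤ g) (hg2 : g ≤ M) :
    ((PySem.List.pyRange 3 (M + 1)).foldl
        (fun (dp : List Int) (k : Int) =>
          dp.set k.toNat (dp.getD (k - 1).toNat 0 + dp.getD (k - 2).toNat 0))
        (PySem.List.slice (List.replicate (max M 3 + 1).toNat (0 : Int)) none (some 1) ++ [1, 2] ++
          PySem.List.slice (List.replicate (max M 3 + 1).toNat (0 : Int)) (some 2) none)).getD g.toNat 0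
      = fibI g.toNat := by
  have hx : (3 : Int) ≤ max M 3 := le_max_right _ _
  have hMx : M ≤ max M 3 := le_max_left _ _
  have hT : 4 ≤ (max M 3 + 1).toNat := by omega
  rw [PySem.List.slice_to _ (by norm_num), PySem.List.slice_from _ (by norm_num)]
  rw [List.take_replicate, List.drop_replicate]
  have hmin : min (1 : Int).toNat (max M 3 + 1).toNat = 1 := by omega
  rw [hmin]
  have hdp1 : List.replicate 1 (0 : Int) ++ [1, 2] ++
      List.replicate ((max M 3 + 1).toNat - (2 : Int).toNat) (0 : Int)
      = 0 :: 1 :: 2 :: List.replicate ((max M 3 + 1).toNat - 2) (0 : Int) := by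
    simp [List.replicate_one]
  rw [hdp1]
  have hMcast : M + 1 = ((M.toNat : Nat) : Int) + 1 := by omega
  rw [hMcast]
  have hh1 : (0 :: 1 :: 2 :: List.replicate ((max M 3 + 1).toNat - 2) (0 : Int)).getD 1 0 = fibI 1 := by
    simp [List.getD, fibI]
  have hh2 : (0 :: 1 :: 2 :: List.replicate ((max M 3 + 1).toNat - 2) (0 : Int)).getD 2 0 = fibI 2 := by
    simp [List.getD, fibI]
  have hlen : M.toNat < (0 :: 1 :: 2 :: List.replicate ((max M 3 + 1).toNat - 2) (0 : Int)).length := by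
    simp [List.length_replicate]
    omega
  exact dp_loop (0 :: 1 :: 2 :: List.replicate ((max M 3 + 1).toNat - 2) (0 : Int)) hh1 hh2
    M.toNat (by omega) hlen g.toNat (by omega) (by omega)

-- ===== VERDICT (by name: the statement is the Claim_ definition above) =====
theorem solve_spec : Claim_equal_solve := by
  unfold Claim_equal_solve Spec_solve
  intro N A _
  show solve N A = solve_alt N A
  simp only [solve, solve_alt, foldA, foldB]
  have hL : (if N + 1 - endB 1 A > 1 then ([1] ++ gaps 1 A) ++ [N + 1 - endB 1 A] else [1] ++ gaps 1 A)
      = 1 :: gaps 1 (A ++ [N + 1]) := by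
    rw [gaps_append, gaps_cons]
    by_cases h : N + 1 - endB 1 A > 1 <;> simp [h, gaps]
  rw [hL, PySem.List.max?_id_cons, Option.getD_some]
  have hbound : ∀ y ∈ 1 :: gaps 1 (A ++ [N + 1]),
      y ≤ (gaps 1 (A ++ [N + 1])).foldl max 1 := by
    intro y hy
    exact PySem.List.max?_isMax (PySem.List.max?_id_cons 1 (gaps 1 (A ++ [N + 1]))) y hy
  have hM1 : (1 : Int) ≤ (gaps 1 (A ++ [N + 1])).foldl max 1 :=
    hbound 1 List.mem_cons_self
  rw [foldl_mul]
  simp only [List.map_cons, List.prod_cons, one_mul]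
  rw [dp_value _ hM1 1 le_rfl hM1]
  have hcong : (gaps 1 (A ++ [N + 1])).map
      (fun k => ((PySem.List.pyRange 3 ((gaps 1 (A ++ [N + 1])).foldl max 1 + 1)).foldl
        (fun (dp : List Int) (k : Int) =>
          dp.set k.toNat (dp.getD (k - 1).toNat 0 + dp.getD (k - 2).toNat 0))
        (PySem.List.slice
            (List.replicate (max ((gaps 1 (A ++ [N + 1])).foldl max 1) 3 + 1).toNat (0 : Int)) none (some 1) ++ [1, 2] ++
          PySem.List.slice
            (List.replicate (max ((gaps 1 (A ++ [N + 1])).foldl max 1) 3 + 1).toNat (0 : Int)) (some 2) none)).getD k.toNat 0)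
      = (gaps 1 (A ++ [N + 1])).map fibCount := by
    apply List.map_congr_left
    intro g hg
    have hg2 : (2 : Int) ≤ g := gaps_ge_two _ _ _ hg
    rw [dp_value _ hM1 g (by omega) (hbound g (List.mem_cons_of_mem _ hg)),
      fibCount_eq g (by omega)]
  rw [hcong]
  simp [fibI]
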